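-- pv_equiv track=rewrite | github.com/sunjianbo945/leetcode | src/amazon/Product Suggestions.py | product_suggestion
-- ===== SOURCE A (Python) =====
-- import collections
--
-- class WordCount:
--     def __init__(self, word, count):
--         self.word = word
--         self.count = count
--
-- class Trie:
--
--     def __init__(self):
--         self.child = {}
--         self.word_list = []
--
--     def insert_word(self, word_count: 'Word'):
--
--         trie = self
--
--         for char in word_count.word:
--             if char not in trie.child:
--                 trie.child[char] = Trie()
--
--             trie.child[char].word_list.append(word_count)
--             trie = trie.child[char]
--
--     def search(self, word):
--
--         if len(word) < 2:
--             return []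
--
--         trie = self
--         for char in word:
--             if char in trie.child:
--                 trie = trie.child[char]
--             else:
--                 return []
--
--         res = sorted(trie.word_list, key=lambda x: (-x.count, x.word))
--         size = min(len(res), 3)
--
--         return [res[i].word for i in range(size)]
--
-- def count_func(repository):
--     res = []
--
--     temp = collections.defaultdict(int)
--
--     for word in repository:
--         temp[word] += 1
--
--     for word, count in temp.items():
--         res.append(WordCount(word, count))
--
--     return res
--
-- def product_suggestion(numProducts, repository, customerQuery):
--     word_counts = count_func(repository)
--
--     trie = Trie()
--     for word_count in word_counts:
--         trie.insert_word(word_count)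
--
--     res = []
--     for i in range(2, len(customerQuery) + 1):
--         res.append(trie.search(customerQuery[:i]))
--
--     return res
-- ===== SOURCE B (Python) =====
-- import collections
--
-- def product_suggestion(numProducts, repository, customerQuery):
--     counts = collections.Counter(repository)
--     cand = [w for w, _ in sorted(counts.items(), key=lambda kv: (-kv[1], kv[0]))]
--     res = []
--     for i in range(2, len(customerQuery) + 1):
--         prefix = customerQuery[:i]
--         cand = [w for w in cand if w.startswith(prefix)]
--         res.append(cand[:3])
--     return res
-- ===== Notes on version B (the rewrite author's own statement) =====
-- stated objective: alternative
-- what changed: B drops the per-character Trie entirely: it counts distinct words with a Counter, sorts them once globally by (-count, word), and answers the growing prefixes by progressively narrowing one candidate list (matches of a longer prefix are a subset of the shorter one's), taking the first 3 survivors per prefix, instead of a trie whose every node stores and re-sorts its own word list.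
import Mathlib
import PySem

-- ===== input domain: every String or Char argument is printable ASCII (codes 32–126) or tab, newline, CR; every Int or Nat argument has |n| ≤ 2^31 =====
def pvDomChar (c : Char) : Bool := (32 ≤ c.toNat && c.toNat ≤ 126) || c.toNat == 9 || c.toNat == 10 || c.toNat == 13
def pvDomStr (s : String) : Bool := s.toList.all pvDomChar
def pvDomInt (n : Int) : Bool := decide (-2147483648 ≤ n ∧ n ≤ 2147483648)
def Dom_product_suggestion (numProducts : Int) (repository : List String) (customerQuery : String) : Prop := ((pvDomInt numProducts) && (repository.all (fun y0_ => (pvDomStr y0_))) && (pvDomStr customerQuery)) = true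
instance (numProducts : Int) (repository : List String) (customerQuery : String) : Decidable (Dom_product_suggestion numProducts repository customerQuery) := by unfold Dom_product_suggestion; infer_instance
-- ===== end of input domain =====

-- B replaces A's per-node Trie by one Counter, one global sort by (-count, word), and a per-prefix
-- progressively narrowed candidate scan (take 3 survivors) — an alternative algorithm of similar cost.


-- ===== PORT A =====
-- A's Trie holds per-char child dicts (a nested inductive, which the kernel refuses), so the trie is
-- encoded exactly by its node paths: a Dict from the path (the List Char walked from the root) to the
-- word_list of the node at that path; insert_word's walk appends word_count to each visited node — exact.
def pvInsertLoop (wc : String × Int) : List Char → List Char →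
    PySem.Dict (List Char) (List (String × Int)) → PySem.Dict (List Char) (List (String × Int))
  | [], _, t => t
  | c :: cs, pre, t => pvInsertLoop wc cs (pre ++ [c]) (t.modify (pre ++ [c]) [] (· ++ [wc]))

def pvInsertWord (t : PySem.Dict (List Char) (List (String × Int))) (wc : String × Int) :
    PySem.Dict (List Char) (List (String × Int)) :=
  pvInsertLoop wc wc.1.toList [] t

-- search's char-by-char walk reaches a node iff the full path is a key (every nonempty prefix of an
-- inserted word is a key, so a present key has all its prefixes present) — the single lookup is exact.
def pvSearch (t : PySem.Dict (List Char) (List (String × Int))) (word : String) : List String :=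
  if PySem.Str.len word < 2 then []
  else
    match t.get? word.toList with
    | none => []
    | some wl =>
      let res := PySem.List.sorted2 wl (fun x => -x.2) (fun x => x.1)
      let size := min res.length 3
      (res.take size).map (fun x => x.1)

def pvCountFunc (repository : List String) : List (String × Int) :=
  let temp := repository.foldl (fun d w => d.modify w 0 (· + 1)) PySem.Dict.empty
  temp.items.foldl (fun r p => r ++ [p]) []

def product_suggestion (numProducts : Int) (repository : List String) (customerQuery : String) : List (List String) :=
  let wordCounts := pvCountFunc repository
  let trie := wordCounts.foldl pvInsertWord PySem.Dict.empty
  (PySem.List.pyRange 2 (PySem.Str.len customerQuery + 1)).foldl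
    (fun res i => res ++ [pvSearch trie (PySem.Str.slice customerQuery none (some i))]) []

-- ===== PORT B =====
def product_suggestion_alt (numProducts : Int) (repository : List String) (customerQuery : String) : List (List String) :=
  let counts := PySem.Dict.counter repository
  let cand0 := (PySem.List.sorted2 counts.items (fun kv => -kv.2) (fun kv => kv.1)).map (fun kv => kv.1)
  ((PySem.List.pyRange 2 (PySem.Str.len customerQuery + 1)).foldl
    (fun st i =>
      let pfx := PySem.Str.slice customerQuery none (some i)
      let cand := st.1.filter (fun w => PySem.Str.startswith w pfx)
      (cand, st.2 ++ [cand.take 3]))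
    (cand0, [])).2

-- ===== PRECONDITION & SPEC =====
def Spec_product_suggestion (numProducts : Int) (repository : List String) (customerQuery : String) (out : List (List String)) : Prop := out = product_suggestion_alt numProducts repository customerQuery
instance (numProducts : Int) (repository : List String) (customerQuery : String) (out : List (List String)) : Decidable (Spec_product_suggestion numProducts repository customerQuery out) := by unfold Spec_product_suggestion; infer_instance

-- ===== CLAIM (what is proved, stated in full; the proofs are below) =====
def Claim_equal_product_suggestion : Prop := ∀ (numProducts : Int) (repository : List String) (customerQuery : String), Dom_product_suggestion numProducts repository customerQuery → Spec_product_suggestion numProducts repository customerQuery (product_suggestion numProducts repository customerQuery)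

-- ===== LEMMAS AND PROOFS =====

-- sorted2 is sorted under the lexicographic key (Python's tuple comparison)
theorem pv_sorted2_eq_sorted_lex {α : Type} (xs : List α) (k1 : α → Int) (k2 : α → String) :
    PySem.List.sorted2 xs k1 k2 = PySem.List.sorted xs (fun x => toLex (k1 x, k2 x)) := by
  unfold PySem.List.sorted2 PySem.List.sorted
  simp only [if_neg (by decide : ¬ (false = true))]
  have hbef : (fun a b => decide (k1 a < k1 b) || (!decide (k1 b < k1 a) && decide (k2 a < k2 b)))
      = fun a b => decide (toLex (k1 a, k2 a) < toLex (k1 b, k2 b)) := by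
    funext a b
    rcases lt_trichotomy (k1 a) (k1 b) with h | h | h
    · simp [h, not_lt_of_gt h, Prod.Lex.lt_iff]
    · simp [h, Prod.Lex.lt_iff]
    · simp [h, not_lt_of_gt h, Prod.Lex.lt_iff]
      intro he; omega
  rw [hbef]

theorem pv_get?_modify_self {κ ν : Type} [BEq κ] [LawfulBEq κ]
    (d : PySem.Dict κ ν) (k : κ) (d0 : ν) (f : ν → ν) :
    (d.modify k d0 f).get? k = some (f (d.getD k d0)) := by
  simp [PySem.Dict.modify, PySem.Dict.get?_insert_self]

theorem pv_get?_modify_of_ne {κ ν : Type} [BEq κ] [LawfulBEq κ]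
    (d : PySem.Dict κ ν) {k k' : κ} (d0 : ν) (f : ν → ν) (h : k' ≠ k) :
    (d.modify k d0 f).get? k' = d.get? k' := by
  simp [PySem.Dict.modify, PySem.Dict.get?_insert_of_ne _ _ h]

theorem pv_insertLoop_get? (wc : String × Int) (p : List Char) :
    ∀ (cs pre : List Char) (t : PySem.Dict (List Char) (List (String × Int))),
    (pvInsertLoop wc cs pre t).get? p =
      if pre <+: p ∧ p ≠ pre ∧ p <+: pre ++ cs
      then some ((t.get? p).getD [] ++ [wc]) else t.get? p := by
  intro cs
  induction cs with
  | nil =>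
    intro pre t
    rw [if_neg]
    · rfl
    · rintro ⟨h1, h2, h3⟩
      simp only [List.append_nil] at h3
      exact h2 (h3.eq_of_length_le h1.length_le)
  | cons c cs ih =>
    intro pre t
    show (pvInsertLoop wc cs (pre ++ [c]) (t.modify (pre ++ [c]) [] (· ++ [wc]))).get? p = _
    rw [ih]
    by_cases h1 : p = pre ++ [c]
    · subst h1
      rw [if_neg (by rintro ⟨_, h, _⟩; exact h rfl)]
      rw [pv_get?_modify_self]
      rw [if_pos ⟨⟨[c], rfl⟩, by simp, ⟨cs, by simp⟩⟩]
      rfl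
    · rw [pv_get?_modify_of_ne _ _ _ h1]
      by_cases h2 : (pre ++ [c]) <+: p
      · have hiff : (pre ++ [c] <+: p ∧ p ≠ pre ++ [c] ∧ p <+: pre ++ [c] ++ cs)
            ↔ (pre <+: p ∧ p ≠ pre ∧ p <+: pre ++ c :: cs) := by
          constructor
          · rintro ⟨ha, hb, hc⟩
            refine ⟨(List.prefix_append pre [c]).trans ha, ?_, by simpa using hc⟩
            rintro rfl
            have := ha.length_le
            simp at this
          · rintro ⟨ha, hb, hc⟩
            exact ⟨h2, h1, by simpa using hc⟩
        rw [if_congr hiff rfl rfl]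
      · rw [if_neg (by rintro ⟨ha, hb, hc⟩; exact h2 ha)]
        rw [if_neg]
        rintro ⟨ha, hb, hc⟩
        -- pre <+: p, p ≠ pre, p <+: pre ++ c :: cs, but ¬ pre++[c] <+: p and p ≠ pre++[c]
        obtain ⟨q, rfl⟩ := ha
        apply h2
        rcases q with _ | ⟨x, q⟩
        · exact absurd (by simp) hb
        · obtain ⟨r, hr⟩ := hc
          have : x = c := by
            have := hr
            rw [List.append_assoc] at this
            have h3 := List.append_cancel_left (by simpa using this : pre ++ (x :: q ++ r) = pre ++ (c :: cs))
            exact (List.cons_eq_cons.mp h3).1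
          subst this
          exact ⟨q, by simp⟩
theorem pv_insertWord_get? (t : PySem.Dict (List Char) (List (String × Int)))
    (wc : String × Int) (p : List Char) (hp : p ≠ []) :
    (pvInsertWord t wc).get? p =
      if p <+: wc.1.toList then some ((t.get? p).getD [] ++ [wc]) else t.get? p := by
  unfold pvInsertWord
  rw [pv_insertLoop_get? wc p wc.1.toList [] t]
  simp [hp]

theorem pv_build_get? (p : List Char) (hp : p ≠ []) :
    ∀ (ws : List (String × Int)) (t : PySem.Dict (List Char) (List (String × Int))),
    (ws.foldl pvInsertWord t).get? p =
      (if ws.filter (fun wc => decide (p <+: wc.1.toList)) = [] then t.get? p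
       else some ((t.get? p).getD [] ++ ws.filter (fun wc => decide (p <+: wc.1.toList)))) := by
  intro ws
  induction ws with
  | nil => intro t; simp
  | cons wc ws ih =>
    intro t
    rw [List.foldl_cons, ih]
    by_cases hpf : p <+: wc.1.toList
    · rw [pv_insertWord_get? t wc p hp, if_pos hpf]
      simp only [List.filter_cons, hpf, decide_true, if_pos]
      by_cases hrest : ws.filter (fun wc => decide (p <+: wc.1.toList)) = []
      · simp [hrest]
      · simp [hrest]
    · rw [pv_insertWord_get? t wc p hp, if_neg hpf]
      simp only [List.filter_cons, hpf, decide_false]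
      simp
theorem pv_countFunc_eq (repository : List String) :
    pvCountFunc repository = (PySem.Dict.counter repository).items := by
  unfold pvCountFunc
  rw [← PySem.Dict.counter_eq_foldl, PySem.List.foldl_append_singleton]
  simp

theorem pv_sorted_filter (items : List (String × Int)) (hnd : (items.map (·.1)).Nodup)
    (pf : String × Int → Bool) :
    PySem.List.sorted (items.filter pf) (fun wc => toLex (-wc.2, wc.1)) =
      (PySem.List.sorted items (fun wc => toLex (-wc.2, wc.1))).filter pf := by
  apply PySem.List.sorted_eq_of_perm_of_pairwise_lt
  · exact (PySem.List.sorted_perm items _ false).filter pf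
  · have h1 := PySem.List.sorted_pairwise items (fun wc => toLex (-wc.2, wc.1))
    have hnd' : items.Pairwise (fun a b => a.1 ≠ b.1) := by
      rw [List.Nodup, List.pairwise_map] at hnd; exact hnd
    have h2 : (PySem.List.sorted items (fun wc => toLex (-wc.2, wc.1)) false).Pairwise
        (fun a b => a.1 ≠ b.1) :=
      ((PySem.List.sorted_perm items _ false).pairwise_iff
        (by intro x y h; exact h.symm)).mpr hnd'
    have h3 : (PySem.List.sorted items (fun wc => toLex (-wc.2, wc.1)) false).Pairwise
        (fun a b => toLex (-a.2, a.1) < toLex (-b.2, b.1)) := by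
      refine (h1.and h2).imp ?_
      rintro a b ⟨hle, hne⟩
      refine lt_of_le_of_ne hle (fun he => hne ?_)
      have := toLex.injective he
      exact (Prod.mk.injEq _ _ _ _ ▸ this).2
    exact h3.filter pf

theorem pv_search_eq (repository : List String) (w : String) (hw : 2 ≤ w.toList.length) :
    pvSearch ((PySem.Dict.counter repository).items.foldl pvInsertWord PySem.Dict.empty) w =
      (((PySem.List.sorted (PySem.Dict.counter repository).items
          (fun wc => toLex (-wc.2, wc.1))).map (fun kv => kv.1)).filter
        (fun x => PySem.Str.startswith x w)).take 3 := by
  have hp : w.toList ≠ [] := by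
    intro h; rw [h] at hw; simp at hw
  have hnd : ((PySem.Dict.counter repository).items.map (fun x => x.1)).Nodup := by
    have := PySem.Dict.nodup_keys_counter repository
    simpa [PySem.Dict.keys] using this
  have hpred : (fun x : String => PySem.Str.startswith x w)
      = fun x => decide (w.toList <+: x.toList) := by
    funext x
    rw [PySem.Str.startswith_eq]
    by_cases h : w.toList <+: x.toList
    · simp [h, (PySem.Chars.startswith_iff _ _).mpr h]
    · simp only [h, decide_false]
      rw [← Bool.not_eq_true, PySem.Chars.startswith_iff]
      exact h
  have hkey : pvSearch ((PySem.Dict.counter repository).items.foldl pvInsertWord PySem.Dict.empty) w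
      = ((PySem.List.sorted ((PySem.Dict.counter repository).items.filter
            (fun wc => decide (w.toList <+: wc.1.toList)))
          (fun wc => toLex (-wc.2, wc.1))).take 3).map (fun x => x.1) := by
    unfold pvSearch
    rw [if_neg (by rw [PySem.Str.len_eq]; omega)]
    rw [pv_build_get? w.toList hp _ PySem.Dict.empty]
    by_cases hL : (PySem.Dict.counter repository).items.filter
        (fun wc => decide (w.toList <+: wc.1.toList)) = []
    · rw [if_pos hL, hL]
      rfl
    · rw [if_neg hL]
      show ((PySem.List.sorted2 _ _ _).take _).map _ = _
      rw [pv_sorted2_eq_sorted_lex]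
      have hempty : ((PySem.Dict.empty : PySem.Dict (List Char)
          (List (String × Int))).get? w.toList).getD [] = [] := rfl
      rw [hempty, List.nil_append]
      congr 1
      rw [min_comm, ← List.take_take, List.take_length]
  rw [hkey, pv_sorted_filter _ hnd, hpred, List.filter_map, ← List.map_take]
  rfl


theorem pv_pref_mono (q : String) (j i : Int) (hj : 0 ≤ j) (hji : j ≤ i) (w : String)
    (h : PySem.Str.startswith w (PySem.Str.slice q none (some i)) = true) :
    PySem.Str.startswith w (PySem.Str.slice q none (some j)) = true := by
  rw [PySem.Str.startswith_eq, PySem.Chars.startswith_iff, PySem.Str.toList_slice,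
    PySem.Chars.slice_eq_listSlice, PySem.List.slice_to _ hj]
  rw [PySem.Str.startswith_eq, PySem.Chars.startswith_iff, PySem.Str.toList_slice,
    PySem.Chars.slice_eq_listSlice, PySem.List.slice_to _ (le_trans hj hji)] at h
  exact (List.take_prefix_take_left (by omega)).trans h

theorem pv_fold_snd (words : List String) (q : String) (n : Nat) :
    ∀ (a j : Int), 0 ≤ j → j ≤ a → ∀ (res : List (List String)),
    ((PySem.List.pyRange a (a + n)).foldl
      (fun st i =>
        let pfx := PySem.Str.slice q none (some i)
        let cand := st.1.filter (fun w => PySem.Str.startswith w pfx)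
        (cand, st.2 ++ [cand.take 3]))
      (words.filter (fun w => PySem.Str.startswith w (PySem.Str.slice q none (some j))), res)).2
    = res ++ (PySem.List.pyRange a (a + n)).map (fun i =>
        (words.filter (fun w => PySem.Str.startswith w (PySem.Str.slice q none (some i)))).take 3) := by
  induction n with
  | zero =>
    intro a j hj hja res
    rw [show a + ((0:Nat):Int) = a by omega, PySem.List.pyRange_one_eq_nil (le_refl a)]
    simp
  | succ n ih =>
    intro a j hj hja res
    have hb : a < a + ((n+1 : Nat) : Int) := by push_cast; omega
    rw [PySem.List.pyRange_one_cons hb]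
    have hcoll : (words.filter
          (fun w => PySem.Str.startswith w (PySem.Str.slice q none (some j)))).filter
          (fun w => PySem.Str.startswith w (PySem.Str.slice q none (some a)))
        = words.filter (fun w => PySem.Str.startswith w (PySem.Str.slice q none (some a))) := by
      rw [List.filter_filter]
      congr 1
      funext w
      by_cases hw : PySem.Str.startswith w (PySem.Str.slice q none (some a)) = true
      · rw [hw, Bool.true_and]
        exact pv_pref_mono q j a hj hja w hw
      · rw [Bool.not_eq_true] at hw
        rw [hw, Bool.false_and]
    have hstep : a + ((n+1 : Nat) : Int) = (a + 1) + (n : Nat) := by push_cast; omega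
    rw [List.foldl_cons]
    simp only []
    rw [hcoll, hstep, ih (a+1) a (by omega) (by omega)]
    simp

-- ===== VERDICT (by name: the statement is the Claim_ definition above) =====
theorem product_suggestion_spec : Claim_equal_product_suggestion := by
  intro numProducts repository customerQuery _
  unfold Spec_product_suggestion product_suggestion product_suggestion_alt
  rw [pv_countFunc_eq, PySem.List.foldl_append_singleton_eq_map, List.nil_append]
  simp only [pv_sorted2_eq_sorted_lex]
  have h0 : ∀ ws : List String,
      ws.filter (fun w => PySem.Str.startswith w
        (PySem.Str.slice customerQuery none (some (0:Int)))) = ws := by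
    intro ws
    apply List.filter_eq_self.mpr
    intro w _
    rw [PySem.Str.startswith_eq, PySem.Chars.startswith_iff, PySem.Str.toList_slice,
      PySem.Chars.slice_eq_listSlice, PySem.List.slice_to _ (le_refl 0)]
    simp
  have hB : ∀ ws : List String,
      ((PySem.List.pyRange 2 (PySem.Str.len customerQuery + 1)).foldl
        (fun st i =>
          let pfx := PySem.Str.slice customerQuery none (some i)
          let cand := st.1.filter (fun w => PySem.Str.startswith w pfx)
          (cand, st.2 ++ [cand.take 3])) (ws, [])).2
      = (PySem.List.pyRange 2 (PySem.Str.len customerQuery + 1)).map (fun i =>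
          (ws.filter (fun w => PySem.Str.startswith w
            (PySem.Str.slice customerQuery none (some i)))).take 3) := by
    intro ws
    by_cases hq : (2:Int) ≤ PySem.Str.len customerQuery + 1
    · have hn : PySem.Str.len customerQuery + 1
          = 2 + (((PySem.Str.len customerQuery + 1 - 2).toNat : Nat) : Int) := by
        rw [PySem.Str.len_eq] at hq ⊢; omega
      have hfold := pv_fold_snd ws customerQuery
        (PySem.Str.len customerQuery + 1 - 2).toNat 2 0 (le_refl 0) (by omega) []
      rw [h0 ws, List.nil_append, ← hn] at hfold
      exact hfold
    · rw [PySem.List.pyRange_one_eq_nil (by omega)]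
      simp
  rw [hB]
  apply List.map_congr_left
  intro i hi
  rw [PySem.List.mem_pyRange_one, PySem.Str.len_eq] at hi
  rw [pv_search_eq]
  rw [PySem.Str.toList_slice, PySem.Chars.slice_eq_listSlice,
    PySem.List.slice_to _ (by omega : (0:Int) ≤ i), List.length_take]
  omega
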